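-- pv_equiv track=rewrite | github.com/Tushar63/Python_dev | prgm6.py | count
-- ===== SOURCE A (Python) =====
-- def count(pat, txt):
--     M = len(pat)
--     N = len(txt)
--     res = 0
--
--     for i in range(N - M + 1):
--
--         j = 0
--         while j < M:
--             if (txt[i + j] != pat[j]):
--                 break
--             j += 1
--
--         if (j == M):
--             res += 1
--             j = 0
--     return res
-- ===== SOURCE B (Python) =====
-- def count(pat, txt):
--     # jump from occurrence to occurrence with str.find instead of testing every position
--     res = 0
--     start = 0
--     while True:
--         i = txt.find(pat, start)
--         if i == -1:
--             return res
--         res += 1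
--         start = i + 1
-- ===== Notes on version B (the rewrite author's own statement) =====
-- stated objective: faster
-- what changed: B replaces A's test-every-position nested scan (hand-written inner character loop per index) with a loop that jumps from occurrence to occurrence using str.find(pat, start), restarting one past each match to keep overlaps.
import Mathlib
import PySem

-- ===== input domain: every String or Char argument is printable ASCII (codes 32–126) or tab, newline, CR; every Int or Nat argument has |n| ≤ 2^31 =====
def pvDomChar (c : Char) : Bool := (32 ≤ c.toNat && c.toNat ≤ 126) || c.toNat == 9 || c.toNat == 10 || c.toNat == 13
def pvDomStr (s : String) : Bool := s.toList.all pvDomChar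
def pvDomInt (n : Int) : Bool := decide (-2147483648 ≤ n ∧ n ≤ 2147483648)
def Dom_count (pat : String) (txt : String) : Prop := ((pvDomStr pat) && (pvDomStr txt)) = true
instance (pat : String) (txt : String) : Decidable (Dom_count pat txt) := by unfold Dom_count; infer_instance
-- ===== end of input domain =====

-- B replaces A's position-by-position nested scan with a loop that jumps between
-- occurrences via str.find (C-speed scanning; same results, including pat = "").


-- ===== PORT A =====
-- inner 'while j < M: if txt[i+j] != pat[j]: break; j += 1' (fuel = M+1 bounds the trip count)
def countWhile (p t : List Char) (i : Int) : Nat → Nat → Nat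
  | _, 0 => 0  -- unreachable: fuel starts at p.length + 1
  | j, fuel + 1 =>
    if j < p.length then
      if PySem.List.pyGet? t (i + j) ≠ PySem.List.pyGet? p j then j
      else countWhile p t i (j + 1) fuel
    else j

def count (pat : String) (txt : String) : Int :=
  let p := pat.toList
  let t := txt.toList
  let M : Int := p.length
  let N : Int := t.length
  (PySem.List.pyRange 0 (N - M + 1) 1).foldl
    (fun res i =>
      let j := countWhile p t i 0 (p.length + 1)
      if (j : Int) = M then res + 1 else res) 0

-- ===== PORT B =====
-- 'while True: i = txt.find(pat, start); if i == -1: return res; res += 1; start = i + 1'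
-- (fuel = len(txt)+2 bounds the trip count: start strictly increases and stays ≤ len+1)
def altLoop (p t : List Char) : Nat → Int → Int → Int
  | 0, _, res => res  -- unreachable with the fuel given below
  | fuel + 1, start, res =>
    let i := PySem.Chars.findFrom t p start none
    if i = -1 then res else altLoop p t fuel (i + 1) (res + 1)

def count_alt (pat : String) (txt : String) : Int :=
  altLoop pat.toList txt.toList (txt.toList.length + 2) 0 0

-- ===== PRECONDITION & SPEC =====
def Spec_count (pat : String) (txt : String) (out : Int) : Prop := out = count_alt pat txt
instance (pat : String) (txt : String) (out : Int) : Decidable (Spec_count pat txt out) := by unfold Spec_count; infer_instance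

-- ===== CLAIM (what is proved, stated in full; the proofs are below) =====
def Claim_equal_count : Prop := ∀ (pat : String) (txt : String), Dom_count pat txt → Spec_count pat txt (count pat txt)

-- ===== LEMMAS AND PROOFS =====

-- common spec: number of positions k ∈ [0, |t|] where p is a prefix of t.drop k
def occ (p t : List Char) : Nat :=
  (List.range (t.length + 1)).countP (fun k => decide (p <+: t.drop k))

-- prefix of a suffix, pointwise
theorem matchPt (p t : List Char) (k : Nat) :
    p <+: t.drop k ↔ ∀ j, j < p.length → p[j]? = t[k + j]? := by
  constructor
  · rintro ⟨s, hs⟩ j hj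
    rw [← List.getElem?_drop, ← hs, List.getElem?_append_left hj]
  · intro h
    rw [List.prefix_iff_eq_take]
    apply List.ext_getElem?
    intro i
    by_cases hi : i < p.length
    · rw [List.getElem?_take_of_lt hi, List.getElem?_drop, ← h i hi]
    · rw [List.getElem?_eq_none (by omega), List.getElem?_eq_none (by simp; omega)]

-- the inner while loop reaches j = M iff every remaining position matches
theorem whileLemma (p t : List Char) (i : Int) :
    ∀ fuel j, j ≤ p.length → p.length - j < fuel →
    (countWhile p t i j fuel = p.length ↔
      ∀ k, j ≤ k → k < p.length →
        PySem.List.pyGet? t (i + k) = PySem.List.pyGet? p k) := by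
  intro fuel
  induction fuel with
  | zero => intro j hj hf; omega
  | succ fuel ih =>
    intro j hj hf
    rw [countWhile]
    by_cases hlt : j < p.length
    · rw [if_pos hlt]
      by_cases hne : PySem.List.pyGet? t (i + j) ≠ PySem.List.pyGet? p j
      · rw [if_pos hne]
        constructor
        · intro h; exact absurd h (by omega)
        · intro h; exact absurd (h j le_rfl hlt) hne
      · rw [if_neg hne]
        rw [not_not] at hne
        rw [ih (j + 1) (by omega) (by omega)]
        constructor
        · intro h k hk1 hk2
          rcases Nat.eq_or_lt_of_le hk1 with rfl | hk
          · exact hne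
          · exact h k hk hk2
        · intro h k hk1 hk2
          exact h k (by omega) hk2
    · rw [if_neg hlt]
      constructor
      · intro _ k hk1 hk2; omega
      · intro _; omega

-- A's per-position test is exactly "p is a prefix of t.drop k"
theorem while_iff_prefix (p t : List Char) (k : Nat) :
    ((countWhile p t (↑k) 0 (p.length + 1) : Int) = (p.length : Int)) ↔ p <+: t.drop k := by
  rw [Int.natCast_inj, whileLemma p t (↑k) (p.length + 1) 0 (by omega) (by omega), matchPt]
  constructor
  · intro h j hj
    have := h j (by omega) hj
    rw [show ((k : Int) + (j : Int)) = ((k + j : Nat) : Int) by push_cast; ring,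
        PySem.List.pyGet?_natCast, PySem.List.pyGet?_natCast] at this
    exact this.symm
  · intro h j _ hj
    rw [show ((k : Int) + (j : Int)) = ((k + j : Nat) : Int) by push_cast; ring,
        PySem.List.pyGet?_natCast, PySem.List.pyGet?_natCast]
    exact (h j hj).symm

theorem count_eq_occ (pat txt : String) : count pat txt = (occ pat.toList txt.toList : Int) := by
  unfold count occ
  rw [PySem.List.foldl_ite_add_one
        (fun i => ((countWhile pat.toList txt.toList i 0 (pat.toList.length + 1) : Int)
          = (pat.toList.length : Int)))]
  rw [PySem.List.pyRange_one, List.countP_map, zero_add]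
  have hcong : (List.range ((txt.toList.length : Int) - (pat.toList.length : Int) + 1 - 0).toNat).countP
        ((fun i => decide ((countWhile pat.toList txt.toList i 0 (pat.toList.length + 1) : Int)
          = (pat.toList.length : Int))) ∘ (fun k : Nat => (0 : Int) + (k : Int)))
      = (List.range ((txt.toList.length : Int) - (pat.toList.length : Int) + 1 - 0).toNat).countP
        (fun k => decide (pat.toList <+: txt.toList.drop k)) := by
    apply List.countP_congr
    intro x _
    simp only [Function.comp_apply, zero_add, decide_eq_true_iff]
    exact while_iff_prefix pat.toList txt.toList x
  rw [hcong]
  -- extend the range from N-M+1 to N+1: positions past N-M never match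
  set p := pat.toList
  set t := txt.toList
  set K := ((t.length : Int) - (p.length : Int) + 1 - 0).toNat with hK
  have hKle : K ≤ t.length + 1 := by omega
  have hsplit : t.length + 1 = K + (t.length + 1 - K) := by omega
  rw [hsplit, List.range_add, List.countP_append]
  have hzero : (List.map (fun x => K + x) (List.range (t.length + 1 - K))).countP
      (fun k => decide (p <+: t.drop k)) = 0 := by
    rw [List.countP_eq_zero]
    intro a ha
    simp only [List.mem_map, List.mem_range] at ha
    obtain ⟨x, hx, rfl⟩ := ha
    simp only [decide_eq_true_iff]
    intro hpre
    have hlen := hpre.length_le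
    rw [List.length_drop] at hlen
    omega
  rw [hzero]
  push_cast
  ring

-- CPython quirk: find with a start past len(s) returns -1 even for an empty pattern
theorem findFrom_past (t p : List Char) :
    PySem.Chars.findFrom t p ((t.length : Int) + 1) none = -1 := by
  simp [PySem.Chars.findFrom]; omega

-- B's loop counts the match positions in [start, |t|]
theorem altLoop_eq (p t : List Char) :
    ∀ fuel (k : Nat) res, k ≤ t.length + 1 → t.length + 2 - k ≤ fuel →
    altLoop p t fuel (k : Int) res
      = res + ((List.range' k (t.length + 1 - k)).countP
          (fun j => decide (p <+: t.drop j)) : Int) := by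
  intro fuel
  induction fuel with
  | zero => intro k res hk hf; omega
  | succ fuel ih =>
    intro k res hk hf
    rw [altLoop]
    by_cases hkN : k ≤ t.length
    · have hfe := PySem.Chars.findFrom_natCast t p k hkN
      by_cases hneg : PySem.Chars.findFrom t p (k : Int) none = -1
      · simp only [hneg]
        have hnin := (PySem.Chars.findFrom_natCast_eq_neg_one_iff t p k hkN).mp hneg
        have hz : (List.range' k (t.length + 1 - k)).countP
            (fun j => decide (p <+: t.drop j)) = 0 := by
          rw [List.countP_eq_zero]
          intro j hj
          rw [List.mem_range'_1] at hj
          simp only [decide_eq_true_iff]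
          intro hpre
          apply hnin
          have hdj : t.drop j = (t.drop k).drop (j - k) := by
            rw [List.drop_drop]; congr 1; omega
          rw [hdj] at hpre
          exact hpre.isInfix.trans (List.drop_suffix _ _).isInfix
        rw [hz]; simp
      · rw [if_neg hneg]
        obtain ⟨hk_le, hpre_m, hmin⟩ := PySem.Chars.findFrom_natCast_spec t p k hkN hneg
        have hfind_ge : 0 ≤ PySem.Chars.find (t.drop k) p := by
          by_contra h
          have h1 := PySem.Chars.neg_one_le_find (t.drop k) p
          have h2 : PySem.Chars.find (t.drop k) p = -1 := by omega
          exact hneg (by rw [hfe, if_pos h2])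
        have hval : PySem.Chars.findFrom t p (k : Int) none
            = (k : Int) + PySem.Chars.find (t.drop k) p := by
          rw [hfe]; rw [if_neg (by omega)]
        have hfl := PySem.Chars.find_le_length (t.drop k) p
        rw [List.length_drop] at hfl
        set m := (PySem.Chars.findFrom t p (k : Int) none).toNat with hm
        have hmval : PySem.Chars.findFrom t p (k : Int) none = (m : Int) := by omega
        have hkm : k ≤ m := by omega
        have hmN : m ≤ t.length := by omega
        rw [hmval, show ((m : Int) + 1) = ((m + 1 : Nat) : Int) by push_cast; ring]
        rw [ih (m + 1) (res + 1) (by omega) (by omega)]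
        -- split range' k (len+1-k) at m
        have hsplit : List.range' k (t.length + 1 - k)
            = List.range' k (m - k) ++ (m :: List.range' (m + 1) (t.length - m)) := by
          have h1 : List.range' k (m - k) ++ List.range' (k + 1 * (m - k)) ((t.length - m) + 1)
              = List.range' k ((m - k) + ((t.length - m) + 1)) := List.range'_append
          rw [show k + 1 * (m - k) = m by omega, List.range'_succ] at h1
          rw [show t.length + 1 - k = (m - k) + ((t.length - m) + 1) by omega, ← h1]
        rw [hsplit, List.countP_append, List.countP_cons]
        have hz : (List.range' k (m - k)).countP (fun j => decide (p <+: t.drop j)) = 0 := by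
          rw [List.countP_eq_zero]
          intro j hj
          rw [List.mem_range'_1] at hj
          simp only [decide_eq_true_iff]
          exact hmin j hj.1 (by omega)
        rw [hz]
        simp only [hpre_m, decide_true, if_true]
        push_cast
        ring
    · have hk1 : k = t.length + 1 := by omega
      subst hk1
      rw [show ((t.length + 1 : Nat) : Int) = ((t.length : Nat) : Int) + 1 by push_cast; ring,
          findFrom_past]
      simp

theorem alt_eq_occ (pat txt : String) : count_alt pat txt = (occ pat.toList txt.toList : Int) := by
  unfold count_alt occ
  have h := altLoop_eq pat.toList txt.toList (txt.toList.length + 2) 0 0 (by omega) (by omega)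
  rw [Nat.cast_zero] at h
  rw [h, List.range_eq_range']
  simp

-- ===== VERDICT (by name: the statement is the Claim_ definition above) =====
theorem count_spec : Claim_equal_count := by
  intro pat txt _
  unfold Spec_count
  rw [count_eq_occ, alt_eq_occ]
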